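-- pv_equiv track=rewrite | github.com/AdamZhouSE/pythonHomework | Code/CodeRecords/2953/60761/236809.py | mintimes
-- ===== SOURCE A (Python) =====
-- def mintimes(a,b):
--     if(a==1):
--         return b-1
--     elif(a==0):
--         return 10000000
--     elif(a==b):
--         return 10000000
--     else:
--         return mintimes(b%a,a)+int(b/a)
-- ===== SOURCE B (Python) =====
-- def mintimes(a, b):
--     # Stage 1: collect the quotient at every Euclidean step until a terminal state.
--     qs = []
--     while a != 1 and a != 0 and a != b:
--         qs.append(int(b / a))
--         a, b = b % a, a
--     # Stage 2: terminal value of the final state, plus the sum of all quotients.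
--     tail = b - 1 if a == 1 else 10000000
--     return sum(qs) + tail
-- ===== Notes on version B (the rewrite author's own statement) =====
-- stated objective: alternative
-- what changed: Two-stage pipeline instead of interleaved recursion: a loop first materializes the whole list of Euclidean quotients int(b/a) down to a terminal state, then the result is sum(list) plus the terminal value (b-1 or 10000000), replacing A's recursion that adds each quotient after the recursive call.
import Mathlib
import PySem

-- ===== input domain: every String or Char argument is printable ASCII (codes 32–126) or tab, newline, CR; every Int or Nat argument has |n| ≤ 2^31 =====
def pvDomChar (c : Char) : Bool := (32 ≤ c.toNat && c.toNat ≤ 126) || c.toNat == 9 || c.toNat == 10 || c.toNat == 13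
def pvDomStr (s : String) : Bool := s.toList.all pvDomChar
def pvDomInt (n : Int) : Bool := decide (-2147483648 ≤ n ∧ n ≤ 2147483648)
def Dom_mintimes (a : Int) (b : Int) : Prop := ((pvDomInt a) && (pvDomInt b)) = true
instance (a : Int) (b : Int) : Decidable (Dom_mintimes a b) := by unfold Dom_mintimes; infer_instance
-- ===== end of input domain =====

-- B is a two-stage pipeline: first materialize the list of Euclidean quotients, then sum it and
-- add the terminal value; same cost as A's interleaved recursion, constant stack. Mutation: none.
-- `int(b/a)` is ported as Int.tdiv (truncation toward zero): exact on Dom, where |a|,|b| ≤ 2^31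
-- keeps the float quotient's rounding inside the unit interval of the true quotient.

-- termination helper for both ports: Python's floored mod shrinks |a|
theorem pvMod_natAbs_lt (b a : Int) (ha : a ≠ 0) :
    (PySem.Int.mod b a).natAbs < a.natAbs := by
  rcases lt_trichotomy a 0 with h | h | h
  · have := PySem.Int.mod_neg_bounds (a := b) (b := a) h
    omega
  · exact absurd h ha
  · have h1 := PySem.Int.mod_nonneg (a := b) (b := a) h
    have h2 := PySem.Int.mod_lt (a := b) (b := a) h
    omega

-- ===== PORT A =====
def mintimes (a : Int) (b : Int) : Int :=
  if a == 1 then b - 1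
  else if a == 0 then 10000000
  else if a == b then 10000000
  else mintimes (PySem.Int.mod b a) a + b.tdiv a
termination_by a.natAbs
decreasing_by
  exact pvMod_natAbs_lt b a (by simp_all)

-- ===== PORT B =====
-- Stage 1 of Source B: the list of quotients together with the terminal state (a, b).
def mintimesQuots (a : Int) (b : Int) : List Int × Int × Int :=
  if a != 1 && a != 0 && a != b then
    let rest := mintimesQuots (PySem.Int.mod b a) a
    (b.tdiv a :: rest.1, rest.2)
  else ([], a, b)
termination_by a.natAbs
decreasing_by
  exact pvMod_natAbs_lt b a (by simp_all)

-- Stage 2 of Source B: sum of the quotients plus the terminal value.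
def mintimes_alt (a : Int) (b : Int) : Int :=
  let r := mintimesQuots a b
  r.1.sum + (if r.2.1 == 1 then r.2.2 - 1 else 10000000)

-- ===== PRECONDITION & SPEC =====
def Spec_mintimes (a : Int) (b : Int) (out : Int) : Prop := out = mintimes_alt a b
instance (a : Int) (b : Int) (out : Int) : Decidable (Spec_mintimes a b out) := by unfold Spec_mintimes; infer_instance

-- ===== CLAIM (what is proved, stated in full; the proofs are below) =====
def Claim_equal_mintimes : Prop := ∀ (a : Int) (b : Int), Dom_mintimes a b → Spec_mintimes a b (mintimes a b)

-- ===== LEMMAS AND PROOFS =====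
theorem mintimesQuots_sum (a b : Int) :
    (mintimesQuots a b).1.sum
      + (if (mintimesQuots a b).2.1 == 1 then (mintimesQuots a b).2.2 - 1 else 10000000)
      = mintimes a b := by
  fun_induction mintimesQuots a b with
  | case1 a b h rest ih =>
      simp only [Bool.and_eq_true, bne_iff_ne, ne_eq] at h
      obtain ⟨⟨h1, h2⟩, h3⟩ := h
      conv_rhs => rw [mintimes]
      simp only [beq_iff_eq, if_neg h1, if_neg h2, if_neg h3, List.sum_cons]
      simp only [beq_iff_eq] at ih
      linarith [ih]
  | case2 a b h =>
      simp only [Bool.and_eq_true, bne_iff_ne, ne_eq, not_and_or, not_not] at h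
      rw [mintimes]
      by_cases h1 : a = 1
      · simp [h1]
      · by_cases h2 : a = 0
        · simp [h2]
        · have h3 : a = b := by tauto
          subst h3
          simp only [beq_iff_eq, if_neg h2]
          split_ifs <;> simp_all

-- ===== VERDICT (by name: the statement is the Claim_ definition above) =====
theorem mintimes_spec : Claim_equal_mintimes := by
  intro a b _
  unfold Spec_mintimes mintimes_alt
  exact (mintimesQuots_sum a b).symm
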